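-- pv_equiv track=rewrite | github.com/visionautomation2025/Atlas-Nutrunner | Dtat_nse_program/originalnse02-2025.py | get_relevant_strikes
-- ===== SOURCE A (Python) =====
-- def get_relevant_strikes(atm_strike):
--     strike_step = 50
--     strikes = []
--     for i in range(9):
--         strikes.append(atm_strike - (i * strike_step))
--     for i in range(1, 10):
--         strikes.append(atm_strike + (i * strike_step))
--     return sorted(strikes)
-- ===== SOURCE B (Python) =====
-- def get_relevant_strikes(atm_strike):
--     # Build the list back-to-front: start at the highest strike and recursively
--     # prepend, descending by 50 until below the lowest strike (atm - 400).
--     def build(s, acc):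
--         if s < atm_strike - 400:
--             return acc
--         return build(s - 50, [s] + acc)
--     return build(atm_strike + 450, [])
-- ===== Notes on version B (the rewrite author's own statement) =====
-- stated objective: alternative
-- what changed: B builds the list back-to-front by a recursive count-down accumulator (prepend from atm+450 down past atm-400), so the list comes out sorted by construction and A's two append loops plus the terminal sorted() call disappear.
import Mathlib
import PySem

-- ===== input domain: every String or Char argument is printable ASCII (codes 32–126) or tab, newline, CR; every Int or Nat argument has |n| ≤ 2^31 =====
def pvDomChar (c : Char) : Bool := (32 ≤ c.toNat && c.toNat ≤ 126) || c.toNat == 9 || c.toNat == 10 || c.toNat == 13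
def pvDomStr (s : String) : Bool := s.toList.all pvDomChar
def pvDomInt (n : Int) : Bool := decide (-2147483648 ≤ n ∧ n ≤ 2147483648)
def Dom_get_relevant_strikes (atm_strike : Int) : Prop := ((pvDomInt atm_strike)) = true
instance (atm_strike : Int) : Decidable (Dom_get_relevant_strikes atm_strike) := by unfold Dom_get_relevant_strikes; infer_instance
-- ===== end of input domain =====

-- B builds the list back-to-front by a recursive count-down accumulator (sorted by construction), instead of A's two append loops followed by sorted().

-- ===== PORT A =====
def get_relevant_strikes (atm_strike : Int) : List Int :=
  let strike_step : Int := 50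
  let strikes : List Int := []
  let strikes := (PySem.List.pyRange 0 9 1).foldl
    (fun acc i => acc ++ [atm_strike - (i * strike_step)]) strikes
  let strikes := (PySem.List.pyRange 1 10 1).foldl
    (fun acc i => acc ++ [atm_strike + (i * strike_step)]) strikes
  PySem.List.sorted strikes (fun x => x) false

-- ===== PORT B =====
-- inner recursive helper 'build' of Source B; terminates because s decreases toward atm - 400
def buildStrikes (atm_strike : Int) (s : Int) (acc : List Int) : List Int :=
  if s < atm_strike - 400 then acc
  else buildStrikes atm_strike (s - 50) (s :: acc)
termination_by (s - atm_strike + 450).toNat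
decreasing_by omega

def get_relevant_strikes_alt (atm_strike : Int) : List Int :=
  buildStrikes atm_strike (atm_strike + 450) []

-- ===== PRECONDITION & SPEC =====
def Spec_get_relevant_strikes (atm_strike : Int) (out : List Int) : Prop := out = get_relevant_strikes_alt atm_strike
instance (atm_strike : Int) (out : List Int) : Decidable (Spec_get_relevant_strikes atm_strike out) := by unfold Spec_get_relevant_strikes; infer_instance

-- ===== CLAIM (what is proved, stated in full; the proofs are below) =====
def Claim_equal_get_relevant_strikes : Prop := ∀ (atm_strike : Int), Dom_get_relevant_strikes atm_strike → Spec_get_relevant_strikes atm_strike (get_relevant_strikes atm_strike)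

-- ===== LEMMAS AND PROOFS =====

-- B evaluates to the explicit ascending list
theorem alt_eval (a : Int) :
    get_relevant_strikes_alt a =
      [a - 400, a - 350, a - 300, a - 250, a - 200, a - 150, a - 100, a - 50, a,
       a + 50, a + 100, a + 150, a + 200, a + 250, a + 300, a + 350, a + 400, a + 450] := by
  unfold get_relevant_strikes_alt
  repeat rw [buildStrikes.eq_def, if_neg (by omega)]
  rw [buildStrikes.eq_def, if_pos (by omega)]
  simp only [List.cons.injEq, and_true]
  omega

-- A evaluates to the same explicit ascending list
theorem a_eval (a : Int) :
    get_relevant_strikes a =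
      [a - 400, a - 350, a - 300, a - 250, a - 200, a - 150, a - 100, a - 50, a,
       a + 50, a + 100, a + 150, a + 200, a + 250, a + 300, a + 350, a + 400, a + 450] := by
  unfold get_relevant_strikes
  have h1 : PySem.List.pyRange 0 9 1 = [0, 1, 2, 3, 4, 5, 6, 7, 8] := by decide
  have h2 : PySem.List.pyRange 1 10 1 = [1, 2, 3, 4, 5, 6, 7, 8, 9] := by decide
  rw [h1, h2]
  simp only [List.foldl]
  apply PySem.List.sorted_eq_of_perm_of_pairwise_lt
  · have e2 : (([] : List Int) ++ [a - 0 * 50] ++ [a - 1 * 50] ++ [a - 2 * 50] ++ [a - 3 * 50] ++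
        [a - 4 * 50] ++ [a - 5 * 50] ++ [a - 6 * 50] ++ [a - 7 * 50] ++ [a - 8 * 50] ++
        [a + 1 * 50] ++ [a + 2 * 50] ++ [a + 3 * 50] ++ [a + 4 * 50] ++ [a + 5 * 50] ++
        [a + 6 * 50] ++ [a + 7 * 50] ++ [a + 8 * 50] ++ [a + 9 * 50]) =
        [a - 400, a - 350, a - 300, a - 250, a - 200, a - 150, a - 100, a - 50, a].reverse ++
        [a + 50, a + 100, a + 150, a + 200, a + 250, a + 300, a + 350, a + 400, a + 450] := by
      simp only [List.reverse, List.reverseAux, List.cons_append, List.nil_append,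
        List.cons.injEq, and_true]
      omega
    rw [e2]
    have : ([a - 400, a - 350, a - 300, a - 250, a - 200, a - 150, a - 100, a - 50, a] : List Int) ++
        [a + 50, a + 100, a + 150, a + 200, a + 250, a + 300, a + 350, a + 400, a + 450] =
        [a - 400, a - 350, a - 300, a - 250, a - 200, a - 150, a - 100, a - 50, a,
         a + 50, a + 100, a + 150, a + 200, a + 250, a + 300, a + 350, a + 400, a + 450] := by
      simp
    rw [← this]
    exact List.Perm.append_right _ (List.reverse_perm _).symm
  · refine List.IsChain.pairwise ?_
    simp only [List.isChain_cons, List.head?_cons, List.head?_nil, Option.mem_def,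
      Option.some.injEq, forall_eq', reduceCtorEq, false_implies, forall_const,
      List.isChain_nil, and_true]
    omega

-- ===== VERDICT (by name: the statement is the Claim_ definition above) =====
theorem get_relevant_strikes_spec : Claim_equal_get_relevant_strikes := by
  intro a _
  unfold Spec_get_relevant_strikes
  rw [a_eval, alt_eval]
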